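-- pv_equiv track=rewrite | github.com/SALT-Research/SHALLOW | src/main.py | chunk_data
-- ===== SOURCE A (Python) =====
-- def chunk_data(
--     data,
--     num_chunks
--     ):
--     """
--         Split data into approximately equal chunks.
--     """
--     ## Calculate the size of each chunk
--     chunk_size = len(data) // num_chunks
--     remainder = len(data) % num_chunks
--     ## Create a list to hold the chunks
--     chunks = []
--     start = 0
--     ## Split the data into chunks
--     for i in range(num_chunks):
--         ## Add one extra item to the first 'remainder' chunks
--         end = start + chunk_size + (1 if i < remainder else 0)
--         chunks.append(data[start:end])
--         start = end
--     ## Return the list of chunks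
--     return chunks
-- ===== SOURCE B (Python) =====
-- def chunk_data(
--     data,
--     num_chunks
--     ):
--     """
--         Split data into approximately equal chunks.
--     """
--     q, r = divmod(len(data), num_chunks)
--     ## Pull elements one at a time from an iterator instead of slicing by
--     ## index: each chunk takes q items, plus one extra while r chunks are owed.
--     it = iter(data)
--     chunks = []
--     for _ in range(num_chunks):
--         s = q + (1 if r > 0 else 0)
--         r -= 1
--         chunks.append([next(it) for _ in range(s)])
--     return chunks
-- ===== Notes on version B (the rewrite author's own statement) =====
-- stated objective: alternative
-- what changed: Replaces A's index arithmetic (accumulated start offset and data[start:end] slices) with single-pass iterator consumption: elements are pulled one at a time with next() from iter(data), each chunk taking q items plus one extra while a countdown remainder is positive.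
import Mathlib
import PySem

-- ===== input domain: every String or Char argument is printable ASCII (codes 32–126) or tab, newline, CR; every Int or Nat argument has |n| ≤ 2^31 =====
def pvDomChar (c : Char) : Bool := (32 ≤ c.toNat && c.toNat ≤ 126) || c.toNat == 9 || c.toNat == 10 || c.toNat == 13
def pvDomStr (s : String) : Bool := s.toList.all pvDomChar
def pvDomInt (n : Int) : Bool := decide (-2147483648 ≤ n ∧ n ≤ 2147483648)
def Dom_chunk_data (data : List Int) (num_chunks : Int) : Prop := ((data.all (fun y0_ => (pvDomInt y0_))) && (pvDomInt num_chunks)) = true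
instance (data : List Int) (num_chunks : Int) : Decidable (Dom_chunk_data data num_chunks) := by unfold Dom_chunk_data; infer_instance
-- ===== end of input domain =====

-- B replaces A's accumulated start offset and data[start:end] slices with
-- iterator consumption: next() pulls each element off the remaining data.
-- Return-value equivalence; neither program mutates its arguments.

-- ===== PORT A =====
def chunk_data (data : List Int) (num_chunks : Int) : List (List Int) :=
  let chunk_size := PySem.Int.floordiv (data.length : Int) num_chunks
  let remainder := PySem.Int.mod (data.length : Int) num_chunks
  let st := (PySem.List.pyRange 0 num_chunks 1).foldl
    (fun (st : List (List Int) × Int) i =>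
      let e := st.2 + chunk_size + (if i < remainder then 1 else 0)
      (st.1 ++ [PySem.List.slice data (some st.2) (some e)], e))
    ([], 0)
  st.1

-- ===== PORT B =====
-- '[next(it) for _ in range(s)]': pop s elements off the iterator's remaining
-- list, returning (chunk, rest). 'next' on an exhausted iterator would raise
-- StopIteration; that is unreachable under Pre_ (the sizes sum to len(data)),
-- so the [] branch's value is never observed on admitted inputs.
def pullNext (rest : List Int) (s : Int) : List Int × List Int :=
  if s ≤ 0 then ([], rest)
  else match rest with
    | [] => ([], [])
    | x :: xs =>
      let p := pullNext xs (s - 1)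
      (x :: p.1, p.2)

def chunk_data_alt (data : List Int) (num_chunks : Int) : List (List Int) :=
  let q := PySem.Int.floordiv (data.length : Int) num_chunks
  let r := PySem.Int.mod (data.length : Int) num_chunks
  -- for _ in range(num_chunks): state (chunks, it, r)
  let st := (PySem.List.pyRange 0 num_chunks 1).foldl
    (fun (st : List (List Int) × List Int × Int) _ =>
      let s := q + (if 0 < st.2.2 then 1 else 0)
      let p := pullNext st.2.1 s
      (st.1 ++ [p.1], p.2, st.2.2 - 1))
    ([], data, r)
  st.1

-- ===== PRECONDITION & SPEC =====
-- Pre_ excludes exactly num_chunks = 0, where A (and B) raise ZeroDivisionError.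
def Pre_chunk_data (data : List Int) (num_chunks : Int) : Prop := num_chunks ≠ 0
instance (data2 : List Int) (num_chunks : Int) : Decidable (Pre_chunk_data data2 num_chunks) := by unfold Pre_chunk_data; infer_instance
def pvWitness_chunk_data : List Int × Int := ([1, 2, 3, 4, 5], 2)

def Spec_chunk_data (data : List Int) (num_chunks : Int) (out : List (List Int)) : Prop := out = chunk_data_alt data num_chunks
instance (data : List Int) (num_chunks : Int) (out : List (List Int)) : Decidable (Spec_chunk_data data num_chunks out) := by unfold Spec_chunk_data; infer_instance

-- ===== CLAIM =====
def Claim_equal_chunk_data : Prop := ∀ (data : List Int) (num_chunks : Int), Dom_chunk_data data num_chunks → Pre_chunk_data data num_chunks → Spec_chunk_data data num_chunks (chunk_data data num_chunks)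

-- ===== LEMMAS AND PROOFS =====

-- Popping s elements off the front is take/drop.
theorem pullNext_eq (rest : List Int) (s : Int) :
    pullNext rest s = (rest.take s.toNat, rest.drop s.toNat) := by
  induction rest generalizing s with
  | nil =>
    rw [pullNext]
    split_ifs <;> simp only [List.take_nil, List.drop_nil]
  | cons x xs ih =>
    rw [pullNext]
    split_ifs with h
    · simp [Int.toNat_of_nonpos h]
    · have hs : s.toNat = (s - 1).toNat + 1 := by omega
      rw [hs]
      simp [ih (s - 1)]

-- Loop correspondence: A's fold over range(a, a+k) from (acc, start) and B's
-- fold from (acc, data.drop start, r - a) produce the same chunk list.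
theorem chunk_loop (data : List Int) (q r : Int) (hq : 0 ≤ q) (k : ℕ) :
    ∀ (a start : Int) (acc : List (List Int)), 0 ≤ start →
    ((PySem.List.pyRange a (a + (k : Int)) 1).foldl
      (fun (st : List (List Int) × Int) i =>
        let e := st.2 + q + (if i < r then 1 else 0)
        (st.1 ++ [PySem.List.slice data (some st.2) (some e)], e))
      (acc, start)).1
    = ((PySem.List.pyRange a (a + (k : Int)) 1).foldl
      (fun (st : List (List Int) × List Int × Int) _ =>
        let s := q + (if 0 < st.2.2 then 1 else 0)
        let p := pullNext st.2.1 s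
        (st.1 ++ [p.1], p.2, st.2.2 - 1))
      (acc, data.drop start.toNat, r - a)).1 := by
  induction k with
  | zero =>
    intro a start acc _
    rw [show a + ((0 : ℕ) : Int) = a by simp, PySem.List.pyRange_one_eq_nil le_rfl]
    rfl
  | succ n ih =>
    intro a start acc hstart
    have hab : a < a + ((n + 1 : ℕ) : Int) := by push_cast; omega
    rw [PySem.List.pyRange_one_cons hab, List.foldl_cons, List.foldl_cons]
    simp only [pullNext_eq] at ih ⊢
    have hcast : a + ((n + 1 : ℕ) : Int) = (a + 1) + (n : Int) := by push_cast; ring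
    rw [hcast]
    set e := start + q + (if a < r then 1 else 0) with he
    have he0 : 0 ≤ e := by rw [he]; split_ifs <;> omega
    rw [ih (a + 1) e (acc ++ [PySem.List.slice data (some start) (some e)]) he0]
    have hcond : (0 < r - a) = (a < r) := propext (by omega)
    have hs0 : 0 ≤ q + (if a < r then (1 : Int) else 0) := by split_ifs <;> omega
    have h1 : PySem.List.slice data (some start) (some e) =
        (data.drop start.toNat).take (q + (if a < r then (1 : Int) else 0)).toNat := by
      rw [PySem.List.slice_toNat data hstart he0]
      congr 1
      rw [he]; split_ifs <;> omega
    have h2 : (data.drop start.toNat).drop (q + (if a < r then (1 : Int) else 0)).toNat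
        = data.drop e.toNat := by
      rw [List.drop_drop]
      congr 1
      rw [he]; split_ifs <;> omega
    have h4 : r - a - 1 = r - (a + 1) := by ring
    simp only [hcond, h1, h2, h4]

-- ===== VERDICT =====
theorem chunk_data_spec : Claim_equal_chunk_data := by
  intro data num_chunks _ _
  unfold Spec_chunk_data chunk_data chunk_data_alt
  by_cases h : num_chunks ≤ 0
  · rw [PySem.List.pyRange_one_eq_nil h]
    rfl
  · rw [not_le] at h
    obtain ⟨k, rfl⟩ : ∃ k : ℕ, num_chunks = (k : Int) :=
      ⟨num_chunks.toNat, (Int.toNat_of_nonneg h.le).symm⟩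
    have hq : 0 ≤ PySem.Int.floordiv (data.length : Int) (k : Int) := by
      rw [PySem.Int.floordiv_eq_ediv_of_pos h]
      exact Int.ediv_nonneg (by positivity) h.le
    have := chunk_loop data (PySem.Int.floordiv (data.length : Int) (k : Int))
      (PySem.Int.mod (data.length : Int) (k : Int)) hq k 0 0 [] le_rfl
    simpa using this
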